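-- pv_equiv track=rewrite | github.com/pc5401/my_BOJ | 백준/Bronze/29097. Короли/Короли.py | solve
-- ===== SOURCE A (Python) =====
-- def solve(n, m, k, a, b, c):
--     totals = {
--         "Joffrey": n * a,
--         "Robb": m * b,
--         "Stannis": k * c,
--     }
--     mx = max(totals.values())
--     names = [name for name in ("Joffrey", "Robb", "Stannis") if totals[name] == mx]
--     return " ".join(names)
-- ===== SOURCE B (Python) =====
-- def solve(n, m, k, a, b, c):
--     best = None
--     names = []
--     for name, score in (("Joffrey", n * a), ("Robb", m * b), ("Stannis", k * c)):
--         if best is None or score > best: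
--             best = score
--             names = [name]
--         elif score == best:
--             names.append(name)
--     return " ".join(names)
-- ===== Notes on version B (the rewrite author's own statement) =====
-- stated objective: alternative
-- what changed: Replaces the dict + separate max() + filtering comprehension with a single pass over (name, score) pairs that maintains the running best score and its holders.
import Mathlib
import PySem

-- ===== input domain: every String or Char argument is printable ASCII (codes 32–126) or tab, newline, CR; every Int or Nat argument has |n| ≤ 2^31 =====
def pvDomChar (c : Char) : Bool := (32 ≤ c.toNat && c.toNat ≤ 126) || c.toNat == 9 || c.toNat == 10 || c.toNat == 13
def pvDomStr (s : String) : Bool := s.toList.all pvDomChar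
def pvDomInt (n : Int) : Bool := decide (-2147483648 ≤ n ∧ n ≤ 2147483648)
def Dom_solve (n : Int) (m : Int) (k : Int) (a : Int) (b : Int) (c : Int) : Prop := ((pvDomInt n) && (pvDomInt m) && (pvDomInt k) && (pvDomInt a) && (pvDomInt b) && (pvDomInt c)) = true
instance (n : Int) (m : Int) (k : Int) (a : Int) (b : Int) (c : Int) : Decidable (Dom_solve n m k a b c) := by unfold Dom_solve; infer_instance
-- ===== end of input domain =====

-- B replaces A's dict + separate max() + filtering comprehension by a single pass over (name, score)
-- pairs that maintains the running best score and its holders (alternative decomposition, same cost).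

-- ===== PORT A =====
def solve (n : Int) (m : Int) (k : Int) (a : Int) (b : Int) (c : Int) : String :=
  let totals : PySem.Dict String Int :=
    (((PySem.Dict.empty).insert "Joffrey" (n * a)).insert "Robb" (m * b)).insert "Stannis" (k * c)
  let mx : Int := (PySem.List.max? totals.values (fun x => x)).getD 0
  let names : List String := ["Joffrey", "Robb", "Stannis"].filter (fun name => totals.getD name 0 == mx)
  PySem.Str.join " " names
-- ===== PORT B =====
def altStep (st : Option Int × List String) (p : String × Int) : Option Int × List String :=
  match st with
  | (none, _) => (some p.2, [p.1])
  | (some best, names) =>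
    if p.2 > best then (some p.2, [p.1])
    else if p.2 == best then (some best, names ++ [p.1])
    else (some best, names)
def solve_alt (n : Int) (m : Int) (k : Int) (a : Int) (b : Int) (c : Int) : String :=
  let cands : List (String × Int) := [("Joffrey", n * a), ("Robb", m * b), ("Stannis", k * c)]
  let st : Option Int × List String := cands.foldl altStep (none, [])
  PySem.Str.join " " st.2
-- ===== PRECONDITION & SPEC =====
def Spec_solve (n : Int) (m : Int) (k : Int) (a : Int) (b : Int) (c : Int) (out : String) : Prop := out = solve_alt n m k a b c
instance (n : Int) (m : Int) (k : Int) (a : Int) (b : Int) (c : Int) (out : String) : Decidable (Spec_solve n m k a b c out) := by unfold Spec_solve; infer_instance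

-- ===== CLAIM (what is proved, stated in full; the proofs are below) =====
def Claim_equal_solve : Prop := ∀ (n : Int) (m : Int) (k : Int) (a : Int) (b : Int) (c : Int), Dom_solve n m k a b c → Spec_solve n m k a b c (solve n m k a b c)

-- ===== LEMMAS AND PROOFS =====
theorem altStep_none (ns : List String) (p : String × Int) :
    altStep (none, ns) p = (some p.2, [p.1]) := rfl
theorem altStep_some (best : Int) (ns : List String) (p : String × Int) :
    altStep (some best, ns) p =
      (if p.2 > best then (some p.2, [p.1])
       else if p.2 == best then (some best, ns ++ [p.1])
       else (some best, ns)) := rfl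

set_option maxHeartbeats 1000000 in
theorem solve_eq_alt (n m k a b c : Int) : solve n m k a b c = solve_alt n m k a b c := by
  unfold solve solve_alt
  simp [PySem.Dict.empty, PySem.Dict.insert, PySem.Dict.values, PySem.Dict.getD,
    PySem.Dict.get?, List.foldl, List.filter, List.map, PySem.List.max?_id_cons,
    Option.getD_some, max_def, altStep_none, altStep_some]
  generalize n * a = x
  generalize m * b = y
  generalize k * c = z
  rcases lt_trichotomy x y with h1|h1|h1 <;>
    rcases lt_trichotomy y z with h2|h2|h2 <;>
      rcases lt_trichotomy x z with h3|h3|h3 <;>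
        ((try simp_all) <;> (try omega))
  all_goals repeat' (first
    | rw [show (x == y) = false from beq_eq_false_iff_ne.mpr (by omega)]
    | rw [show (y == x) = false from beq_eq_false_iff_ne.mpr (by omega)]
    | rw [show (x == z) = false from beq_eq_false_iff_ne.mpr (by omega)]
    | rw [show (z == x) = false from beq_eq_false_iff_ne.mpr (by omega)]
    | rw [show (y == z) = false from beq_eq_false_iff_ne.mpr (by omega)]
    | rw [show (z == y) = false from beq_eq_false_iff_ne.mpr (by omega)]
    | rw [show (x == y) = true from beq_iff_eq.mpr (by omega)]
    | rw [show (y == x) = true from beq_iff_eq.mpr (by omega)]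
    | rw [show (x == z) = true from beq_iff_eq.mpr (by omega)]
    | rw [show (z == x) = true from beq_iff_eq.mpr (by omega)]
    | rw [show (y == z) = true from beq_iff_eq.mpr (by omega)]
    | rw [show (z == y) = true from beq_iff_eq.mpr (by omega)]
    | rw [beq_self_eq_true]
    | rw [if_pos (show x ≤ y by omega)] | rw [if_neg (show ¬ x ≤ y by omega)]
    | rw [if_pos (show y ≤ z by omega)] | rw [if_neg (show ¬ y ≤ z by omega)]
    | rw [if_pos (show x ≤ z by omega)] | rw [if_neg (show ¬ x ≤ z by omega)]
    | rw [if_pos (show x < y by omega)] | rw [if_neg (show ¬ x < y by omega)]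
    | rw [if_pos (show y < z by omega)] | rw [if_neg (show ¬ y < z by omega)]
    | rw [if_pos (show x < z by omega)] | rw [if_neg (show ¬ x < z by omega)]
    | rw [if_pos (show z = y by omega)] | rw [if_neg (show ¬ z = y by omega)]
    | rw [if_pos (show y = z by omega)] | rw [if_neg (show ¬ y = z by omega)]
    | rw [if_pos (show x = y by omega)] | rw [if_neg (show ¬ x = y by omega)]
    | rw [if_pos (show x = z by omega)] | rw [if_neg (show ¬ x = z by omega)]
    | rw [if_pos (show y = x by omega)] | rw [if_neg (show ¬ y = x by omega)]
    | rw [if_pos (show z = x by omega)] | rw [if_neg (show ¬ z = x by omega)]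
    | rw [if_pos (show y ≤ x by omega)] | rw [if_neg (show ¬ y ≤ x by omega)]
    | rw [if_pos (show z ≤ y by omega)] | rw [if_neg (show ¬ z ≤ y by omega)]
    | rw [if_pos (show z ≤ x by omega)] | rw [if_neg (show ¬ z ≤ x by omega)]
    | rw [if_pos (show y < x by omega)] | rw [if_neg (show ¬ y < x by omega)]
    | rw [if_pos (show z < y by omega)] | rw [if_neg (show ¬ z < y by omega)]
    | rw [if_pos (show z < x by omega)] | rw [if_neg (show ¬ z < x by omega)]
    | rw [if_pos (show z ≤ z by omega)] | rw [if_pos (show y ≤ y by omega)]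
    | rw [if_pos (show x ≤ x by omega)]
    | rw [Option.getD_some] | rw [altStep_some] | rw [altStep_none]
    | simp)
  all_goals rfl

-- ===== VERDICT (by name: the statement is the Claim_ definition above) =====
theorem solve_spec : Claim_equal_solve := by
  intro n m k a b c _
  unfold Spec_solve
  exact solve_eq_alt n m k a b c
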